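-- pv_equiv track=rewrite | github.com/ArdalanM/nlp-benchmarks | src/lib.py | _char_token_indice
-- ===== SOURCE A (Python) =====
-- def _char_token_indice(sentences, ngram_range=(1, 1)):
--
--     min_ngrams, max_ngrams = ngram_range
--     token_indice = {}
--     # We make sure the minimum value of our mapping is 1 (0 will be reserved)
--     indexer = 1
--
--     for sentence in sentences:
--         for i in range(0, len(sentence)-max_ngrams+1, min_ngrams):
--             for ngram_value in range(min_ngrams, max_ngrams+1):
--                 ngram = sentence[i:i+ngram_value]
--                 if ngram not in token_indice:
--                     token_indice[ngram] = indexer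
--                     indexer += 1
--     return token_indice
-- ===== SOURCE B (Python) =====
-- def _char_token_indice(sentences, ngram_range=(1, 1)):
--     min_ngrams, max_ngrams = ngram_range
--     # Phase 1: flatten the n-gram stream (same traversal bounds/step as the spec).
--     stream = [s[i:i+v] for s in sentences
--               for i in range(0, len(s) - max_ngrams + 1, min_ngrams)
--               for v in range(min_ngrams, max_ngrams + 1)]
--     # Phase 2: back-to-front overwrite pass; the surviving value for each n-gram
--     # is its FIRST position in the stream (no membership tests anywhere).
--     first = {}
--     for p, ng in reversed(list(enumerate(stream))):
--         first[ng] = p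
--     # Phase 3: keep each position that is its n-gram's first position, number from 1.
--     uniq = [ng for p, ng in enumerate(stream) if first[ng] == p]
--     return {ng: k for k, ng in enumerate(uniq, 1)}
-- ===== Notes on version B (the rewrite author's own statement) =====
-- stated objective: alternative
-- what changed: Replaces A's single pass that maintains a dict under an inline 'not in' membership guard by three guard-free passes: flatten the n-gram stream, a back-to-front overwrite pass recording each n-gram's first position, then keep exactly the positions that are first occurrences and number them from 1.
import Mathlib
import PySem

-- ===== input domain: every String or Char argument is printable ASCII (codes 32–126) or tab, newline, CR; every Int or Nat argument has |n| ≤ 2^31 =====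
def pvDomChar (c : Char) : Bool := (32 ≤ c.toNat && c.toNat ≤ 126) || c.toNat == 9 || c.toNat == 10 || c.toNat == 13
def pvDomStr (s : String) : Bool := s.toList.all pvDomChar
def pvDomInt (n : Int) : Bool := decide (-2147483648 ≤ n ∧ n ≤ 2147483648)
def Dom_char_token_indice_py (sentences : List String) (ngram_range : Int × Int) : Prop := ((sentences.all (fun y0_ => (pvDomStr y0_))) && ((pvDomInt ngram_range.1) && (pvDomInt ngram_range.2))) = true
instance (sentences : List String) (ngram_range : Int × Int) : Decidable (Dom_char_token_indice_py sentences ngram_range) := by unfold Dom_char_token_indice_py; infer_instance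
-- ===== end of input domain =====

-- B replaces A's single pass (a dict maintained under an inline membership guard) by three
-- passes with no membership test at all: flatten the n-gram stream, a back-to-front overwrite
-- pass recording each n-gram's first position, then keep the positions that are first
-- occurrences and number them from 1.  Objective: alternative decomposition, same cost.

-- ===== PORT A =====
-- literal transliteration of A: nested loops maintaining (dict, indexer)
def char_token_indice_py (sentences : List String) (ngram_range : Int × Int) : List (String × Int) :=
  let min_ngrams := ngram_range.1
  let max_ngrams := ngram_range.2
  let st := sentences.foldl (fun st sentence =>
      (PySem.List.pyRange 0 (PySem.Str.len sentence - max_ngrams + 1) min_ngrams).foldl (fun st i =>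
        (PySem.List.pyRange min_ngrams (max_ngrams + 1) 1).foldl (fun st ngram_value =>
          let ngram := PySem.Str.slice sentence (some i) (some (i + ngram_value))
          if st.1.contains ngram then st else (st.1.insert ngram st.2, st.2 + 1)) st) st)
    ((PySem.Dict.empty : PySem.Dict String Int), (1 : Int))
  st.1.items

-- ===== PORT B =====
-- literal transliteration of B: flatten the stream; back-to-front overwrite pass for first
-- positions (reversed(list(enumerate(stream)))); keep first occurrences; number from 1.
-- ('first[ng]' is ported as getD with an unused default: every stream element was inserted,
-- so the lookup never misses — exact here.  'enumerate(xs, s)' is ported as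
-- List.zipIdx with the pair swapped — exact, element for element; PySem's structural
-- enumerate overflows the interpreter stack on long streams.)
def char_token_indice_py_alt (sentences : List String) (ngram_range : Int × Int) : List (String × Int) :=
  let min_ngrams := ngram_range.1
  let max_ngrams := ngram_range.2
  let stream := sentences.flatMap (fun s =>
    (PySem.List.pyRange 0 (PySem.Str.len s - max_ngrams + 1) min_ngrams).flatMap (fun i =>
      (PySem.List.pyRange min_ngrams (max_ngrams + 1) 1).map (fun v =>
        PySem.Str.slice s (some i) (some (i + v)))))
  let first := (((stream.zipIdx.map (fun p => ((p.2 : Int), p.1)))).reverse).foldl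
      (fun d pr => d.insert pr.2 pr.1)
      (PySem.Dict.empty : PySem.Dict String Int)
  let uniq := ((stream.zipIdx.map (fun p => ((p.2 : Int), p.1))).filter
      (fun pr => first.getD pr.2 0 == pr.1)).map (fun pr => pr.2)
  ((uniq.zipIdx 1).map (fun p => ((p.2 : Int), p.1))).map (fun p => (p.2, p.1))

-- ===== PRECONDITION & SPEC =====
-- Pre_ excludes step 0 on a nonempty sentence list: range(0, n, 0) raises ValueError in Python (for both A and B).
def Pre_char_token_indice_py (sentences : List String) (ngram_range : Int × Int) : Prop :=
  sentences = [] ∨ ngram_range.1 ≠ 0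
instance (sentences : List String) (ngram_range : Int × Int) : Decidable (Pre_char_token_indice_py sentences ngram_range) := by unfold Pre_char_token_indice_py; infer_instance
def pvWitness_char_token_indice_py : List String × (Int × Int) := (["abc", "bcd"], (1, 2))

def Spec_char_token_indice_py (sentences : List String) (ngram_range : Int × Int) (out : List (String × Int)) : Prop := out = char_token_indice_py_alt sentences ngram_range
instance (sentences : List String) (ngram_range : Int × Int) (out : List (String × Int)) : Decidable (Spec_char_token_indice_py sentences ngram_range out) := by unfold Spec_char_token_indice_py; infer_instance

-- ===== CLAIM (what is proved, stated in full; the proofs are below) =====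
def Claim_equal_char_token_indice_py : Prop := ∀ (sentences : List String) (ngram_range : Int × Int), Dom_char_token_indice_py sentences ngram_range → Pre_char_token_indice_py sentences ngram_range → Spec_char_token_indice_py sentences ngram_range (char_token_indice_py sentences ngram_range)

-- ===== LEMMAS AND PROOFS =====

-- the association list "distinct keys numbered from 1" (shape shared by both sides' results)
def pvEnum1 (ks : List String) : List (String × Int) :=
  (PySem.List.enumerate ks 1).map (fun p => (p.2, p.1))

-- A's loop body as a named step function
def pvStep (st : PySem.Dict String Int × Int) (ngram : String) : PySem.Dict String Int × Int :=
  if st.1.contains ngram then st else (st.1.insert ngram st.2, st.2 + 1)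

lemma pvEnum1_append_singleton (ks : List String) (ng : String) :
    pvEnum1 (ks ++ [ng]) = pvEnum1 ks ++ [(ng, 1 + (ks.length : Int))] := by
  simp [pvEnum1, PySem.List.enumerate_append, PySem.List.enumerate_cons, PySem.List.enumerate_nil]

lemma pvEnum1_keys (d : PySem.Dict String Int) (ks : List String) (h : d.items = pvEnum1 ks) :
    d.keys = ks := by
  have : d.keys = d.items.map (·.1) := rfl
  rw [this, h, pvEnum1]
  rw [List.map_map]
  have : ((fun (p : String × Int) => p.1) ∘ fun (p : Int × String) => (p.2, p.1))
       = (fun (p : Int × String) => p.2) := rfl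
  rw [this, PySem.List.map_snd_enumerate]

-- A-side loop invariant: folding A's step over a stream L, starting from a dict that is
-- exactly "ks numbered from 1" with counter 1 + |ks|, yields "ks updated by L, numbered from 1".
lemma pvLoop_items (L : List String) : ∀ (ks : List String) (d : PySem.Dict String Int),
    ks.Nodup → d.items = pvEnum1 ks →
    (L.foldl pvStep (d, 1 + (ks.length : Int))).1.items = pvEnum1 (PySem.Set.update ks L) := by
  induction L with
  | nil => intro ks d _ hd; simpa [PySem.Set.update_nil] using hd
  | cons ng L ih =>
    intro ks d hnd hd
    have hkeys : d.keys = ks := pvEnum1_keys d ks hd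
    rw [List.foldl_cons, PySem.Set.update_cons]
    by_cases hmem : ng ∈ ks
    · have hc : d.contains ng = true := by
        rw [PySem.Dict.contains_iff_mem_keys, hkeys]; exact hmem
      rw [PySem.Set.add_of_mem hmem]
      simpa [pvStep, hc] using ih ks d hnd hd
    · have hc : d.contains ng = false := by
        rw [Bool.eq_false_iff]
        intro h
        exact hmem (hkeys ▸ (PySem.Dict.contains_iff_mem_keys d ng).mp h)
      rw [PySem.Set.add_of_not_mem hmem]
      have hdis : List.Disjoint ks [ng] := by
        intro a ha hb
        rw [List.mem_singleton] at hb
        exact hmem (hb ▸ ha)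
      have hnd' : (ks ++ [ng]).Nodup := hnd.append (List.nodup_singleton ng) hdis
      have hitems : (d.insert ng (1 + (ks.length : Int))).items = pvEnum1 (ks ++ [ng]) := by
        rw [PySem.Dict.items_insert_of_not_contains d _ hc, hd, pvEnum1_append_singleton]
      have := ih (ks ++ [ng]) (d.insert ng (1 + (ks.length : Int))) hnd' hitems
      simp only [pvStep, hc, Bool.false_eq_true, if_false]
      have hlen : (1 + (ks.length : Int)) + 1 = 1 + ((ks ++ [ng]).length : Int) := by
        simp; ring
      rw [hlen]
      exact this

-- B-side: a fold of inserts of (key, value) pairs looked up afterwards = the LAST pair with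
-- that key (i.e. the first one of the reversed pair list), else the start dict's entry.
lemma pvFoldIns_get? (L : List (String × Int)) : ∀ (d0 : PySem.Dict String Int) (k : String),
    (L.foldl (fun d p => d.insert p.1 p.2) d0).get? k =
      (L.reverse.find? (fun p => p.1 == k)).elim (d0.get? k) (fun p => some p.2) := by
  induction L with
  | nil => intro d0 k; simp
  | cons a t ih =>
    intro d0 k
    rw [List.foldl_cons, ih, List.reverse_cons, List.find?_append]
    cases hf : t.reverse.find? (fun p => p.1 == k) with
    | some p => simp
    | none =>
      simp only [Option.none_or]
      by_cases hk : k = a.1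
      · simp [hk, PySem.Dict.get?_insert_self]
      · have hbeq : (a.1 == k) = false := by simpa using fun h => hk h.symm
        simp [List.find?, hbeq, PySem.Dict.get?_insert_of_ne d0 a.2 hk]

-- find? over the (value, position) pairs of enumerate = index? (first occurrence)
lemma pvFindEnum (xs : List String) : ∀ (s : Int) (k : String),
    (((PySem.List.enumerate xs s).map (fun pr => (pr.2, pr.1))).find? (fun p => p.1 == k))
      = (PySem.List.index? xs k).map (fun j => (k, s + (j : Int))) := by
  induction xs with
  | nil => intro s k; simp [PySem.List.enumerate_nil, PySem.List.index?_eq_idxOf?]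
  | cons x t ih =>
    intro s k
    rw [PySem.List.enumerate_cons]
    by_cases hx : x = k
    · subst hx
      simp [PySem.List.index?_eq_idxOf?, List.idxOf?_cons]
    · rw [PySem.List.index?_cons_of_ne t hx]
      simp only [List.map_cons, List.find?_cons]
      have hbeq : (x == k) = false := by simpa using hx
      simp only [hbeq, ih (s + 1) k]
      cases PySem.List.index? t k
      · simp
      · simp; ring

-- index? of a member is a position strictly inside the list
lemma pvIndex?_lt (xs : List String) (v : String) (j : Nat)
    (h : PySem.List.index? xs v = some j) : j < xs.length := by
  rw [PySem.List.index?_eq_some_iff] at h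
  obtain ⟨pre, suf, hx, hl, -⟩ := h
  subst hx hl
  simp

-- keeping exactly the first-occurrence positions yields the ordered distinct elements
lemma pvFilterDedup (xs : List String) :
    (((PySem.List.enumerate xs 0).filter
        (fun pr => ((PySem.List.index? xs pr.2).map (fun j => (j : Int))).getD 0 == pr.1)).map
      (fun pr => pr.2)) = PySem.Set.ofList xs := by
  induction xs using List.reverseRecOn with
  | nil => simp [PySem.List.enumerate_nil, PySem.Set.ofList]
  | append_singleton t z ih =>
    rw [PySem.List.enumerate_append, List.filter_append, List.map_append]
    have hof : PySem.Set.ofList (t ++ [z]) = PySem.Set.add (PySem.Set.ofList t) z := by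
      rw [PySem.Set.ofList_eq_foldl, PySem.Set.ofList_eq_foldl, List.foldl_append]
      rfl
    have hcongr : (PySem.List.enumerate t 0).filter
          (fun pr => ((PySem.List.index? (t ++ [z]) pr.2).map (fun j => (j : Int))).getD 0 == pr.1)
        = (PySem.List.enumerate t 0).filter
          (fun pr => ((PySem.List.index? t pr.2).map (fun j => (j : Int))).getD 0 == pr.1) := by
      apply List.filter_congr
      intro pr hpr
      have hmem : pr.2 ∈ t := by
        have := List.mem_map_of_mem (f := fun (p : Int × String) => p.2) hpr
        rwa [PySem.List.map_snd_enumerate] at this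
      rw [PySem.List.index?_append_of_mem _ hmem]
    rw [hcongr, ih, hof]
    by_cases hz : z ∈ t
    · rw [PySem.Set.add_of_mem (by rwa [PySem.Set.mem_ofList])]
      obtain ⟨j, hj⟩ : ∃ j, PySem.List.index? t z = some j := by
        cases h : PySem.List.index? t z with
        | some j => exact ⟨j, rfl⟩
        | none =>
          exfalso
          rw [PySem.List.index?_eq_idxOf?] at h
          exact (List.idxOf?_eq_none_iff.mp h) hz
      have hjlt : j < t.length := pvIndex?_lt t z j hj
      have hcond : (((PySem.List.index? (t ++ [z]) z).map (fun j => (j : Int))).getD 0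
          == (0 + (t.length : Int))) = false := by
        rw [PySem.List.index?_append_of_mem _ hz, hj]
        simp
        omega
      have : (PySem.List.enumerate [z] (0 + (t.length : Int))).filter
          (fun pr => ((PySem.List.index? (t ++ [z]) pr.2).map (fun j => (j : Int))).getD 0 == pr.1)
          = [] := by
        simp only [PySem.List.enumerate_cons, PySem.List.enumerate_nil,
          List.filter_cons, List.filter_nil, hcond]
        simp
      rw [this]
      simp
    · rw [PySem.Set.add_of_not_mem (by rwa [PySem.Set.mem_ofList])]
      have hcond : (((PySem.List.index? (t ++ [z]) z).map (fun j => (j : Int))).getD 0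
          == (0 + (t.length : Int))) = true := by
        rw [PySem.List.index?_append_singleton_self t z hz]
        simp
      have : (PySem.List.enumerate [z] (0 + (t.length : Int))).filter
          (fun pr => ((PySem.List.index? (t ++ [z]) pr.2).map (fun j => (j : Int))).getD 0 == pr.1)
          = [(0 + (t.length : Int), z)] := by
        simp only [PySem.List.enumerate_cons, PySem.List.enumerate_nil,
          List.filter_cons, List.filter_nil, hcond]
        simp
      rw [this]
      simp

-- B's first-position dict looks up to index?
lemma pvFirst_getD (xs : List String) (k : String) :
    (((PySem.List.enumerate xs 0).reverse).foldl
        (fun d pr => d.insert pr.2 pr.1)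
        (PySem.Dict.empty : PySem.Dict String Int)).getD k 0
      = ((PySem.List.index? xs k).map (fun j => (j : Int))).getD 0 := by
  have hfold : ((PySem.List.enumerate xs 0).reverse).foldl
        (fun d pr => d.insert pr.2 pr.1)
        (PySem.Dict.empty : PySem.Dict String Int)
      = ((((PySem.List.enumerate xs 0).reverse).map (fun pr => (pr.2, pr.1))).foldl
          (fun d pr => d.insert pr.1 pr.2) PySem.Dict.empty) := by
    rw [List.foldl_map]
  rw [hfold, PySem.Dict.getD_eq_get?_getD, pvFoldIns_get?, ← List.map_reverse,
      List.reverse_reverse, pvFindEnum]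
  cases PySem.List.index? xs k <;> simp

-- list(enumerate(xs, s)) is zipIdx with the pair swapped
lemma pvZipEnum {α : Type} (xs : List α) : ∀ (n : Nat),
    (xs.zipIdx n).map (fun p => ((p.2 : Int), p.1)) = PySem.List.enumerate xs (n : Int) := by
  induction xs with
  | nil => intro n; simp [PySem.List.enumerate_nil]
  | cons x t ih =>
    intro n
    rw [List.zipIdx_cons, PySem.List.enumerate_cons, List.map_cons, ih (n + 1)]
    push_cast
    rfl

lemma pvZip0 {α : Type} (xs : List α) :
    xs.zipIdx.map (fun p => ((p.2 : Int), p.1)) = PySem.List.enumerate xs 0 := by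
  exact_mod_cast pvZipEnum xs 0

lemma pvZip1 {α : Type} (xs : List α) :
    (xs.zipIdx 1).map (fun p => ((p.2 : Int), p.1)) = PySem.List.enumerate xs 1 := by
  exact_mod_cast pvZipEnum xs 1

-- A's fold and B's three passes agree on any stream
lemma pvMain (xs : List String) :
    (xs.foldl pvStep ((PySem.Dict.empty : PySem.Dict String Int), (1 : Int))).1.items
      = (PySem.List.enumerate
          (((PySem.List.enumerate xs 0).filter
            (fun pr => ((((PySem.List.enumerate xs 0).reverse).foldl
                (fun d pr => d.insert pr.2 pr.1)
                (PySem.Dict.empty : PySem.Dict String Int)).getD pr.2 0) == pr.1)).map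
            (fun pr => pr.2)) 1).map (fun p => (p.2, p.1)) := by
  have hA := pvLoop_items xs [] PySem.Dict.empty List.nodup_nil
    (by simp [pvEnum1, PySem.List.enumerate_nil]; rfl)
  simp only [List.length_nil, Nat.cast_zero, add_zero, PySem.Set.update_nil_left] at hA
  have hB : ((PySem.List.enumerate xs 0).filter
      (fun pr => ((((PySem.List.enumerate xs 0).reverse).foldl
        (fun d pr => d.insert pr.2 pr.1)
        (PySem.Dict.empty : PySem.Dict String Int)).getD pr.2 0) == pr.1)).map
      (fun pr => pr.2) = PySem.Set.ofList xs := by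
    rw [← pvFilterDedup xs]
    congr 1
    apply List.filter_congr
    intro pr _
    rw [pvFirst_getD]
  rw [hA, hB, pvEnum1]

-- ===== VERDICT (by name: the statement is the Claim_ definition above) =====
theorem char_token_indice_py_spec : Claim_equal_char_token_indice_py := by
  intro sentences ngram_range _ _
  unfold Spec_char_token_indice_py char_token_indice_py char_token_indice_py_alt
  have h := pvMain (sentences.flatMap (fun s =>
    (PySem.List.pyRange 0 (PySem.Str.len s - ngram_range.2 + 1) ngram_range.1).flatMap (fun i =>
      (PySem.List.pyRange ngram_range.1 (ngram_range.2 + 1) 1).map (fun v =>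
        PySem.Str.slice s (some i) (some (i + v))))))
  simp only [List.foldl_flatMap, List.foldl_map, pvStep] at h
  simp only [pvZip0, pvZip1]
  exact h
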